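-- pv_equiv track=rewrite | github.com/Kshitija933/AI-Powered-Cold-Email-Generator-Pro | train_model.py | _apply_industry_language
-- ===== SOURCE A (Python) =====
-- def _apply_industry_language(text, industry):
--     """Apply industry-specific terminology"""
--     industry_terms = {
--         'Healthcare': {
--             'efficiency': 'patient care efficiency',
--             'process': 'clinical process',
--             'system': 'healthcare system'
--         },
--         'Finance': {
--             'efficiency': 'operational efficiency',
--             'process': 'transaction process',
--             'system': 'financial system'
--         },
--         'Technology': {
--             'efficiency': 'development efficiency',
--             'process': 'deployment process',
--             'system': 'tech stack'
--         }
--     }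
--
--     if industry in industry_terms:
--         for generic, specific in industry_terms[industry].items():
--             text = text.replace(generic, specific)
--
--     return text
-- ===== SOURCE B (Python) =====
-- def _apply_industry_language(text, industry):
--     """Apply industry-specific terminology (single left-to-right pass)."""
--     industry_terms = {
--         'Healthcare': {
--             'efficiency': 'patient care efficiency',
--             'process': 'clinical process',
--             'system': 'healthcare system'
--         },
--         'Finance': {
--             'efficiency': 'operational efficiency',
--             'process': 'transaction process',
--             'system': 'financial system'
--         },
--         'Technology': {
--             'efficiency': 'development efficiency',
--             'process': 'deployment process',
--             'system': 'tech stack'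
--         }
--     }
--
--     terms = industry_terms.get(industry)
--     if terms is None:
--         return text
--
--     out = []
--     i = 0
--     n = len(text)
--     while i < n:
--         for generic, specific in terms.items():
--             if text.startswith(generic, i):
--                 out.append(specific)
--                 i += len(generic)
--                 break
--         else:
--             out.append(text[i])
--             i += 1
--     return ''.join(out)
-- ===== Notes on version B (the rewrite author's own statement) =====
-- stated objective: alternative
-- what changed: B makes a single left-to-right pass over the text, at each position trying the three generic terms and emitting the industry-specific replacement (skipping the matched term) or copying one character, instead of A's three successive full-text str.replace scans.
-- intended difference: When the industry is Healthcare, Finance or Technology and the text contains the overlapping substring 'processystem', A's later replace('system', ...) cascades into the trailing 's' of the just-inserted process replacement (e.g. A('processystem','Finance') = 'transaction procesfinancial system'), while B's single pass replaces only the leftmost term and returns 'transaction processystem', which is the intended non-cascading substitution. — e.g. on _apply_industry_language("processystem", "Finance"): A returns "transaction procesfinancial system", B returns "transaction processystem"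
import Mathlib
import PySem

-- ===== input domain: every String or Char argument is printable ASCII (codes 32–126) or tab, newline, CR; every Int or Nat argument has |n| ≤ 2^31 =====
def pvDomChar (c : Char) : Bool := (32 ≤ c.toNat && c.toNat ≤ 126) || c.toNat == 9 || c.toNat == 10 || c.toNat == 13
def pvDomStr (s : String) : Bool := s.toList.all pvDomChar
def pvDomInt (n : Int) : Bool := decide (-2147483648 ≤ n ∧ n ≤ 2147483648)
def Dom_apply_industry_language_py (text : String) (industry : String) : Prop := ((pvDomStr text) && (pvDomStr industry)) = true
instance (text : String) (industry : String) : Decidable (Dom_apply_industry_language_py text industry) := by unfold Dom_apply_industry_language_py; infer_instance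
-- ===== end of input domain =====

-- B replaces A's three successive full-text str.replace passes by a single left-to-right scan
-- that tries the three generic terms at each position (objective: alternative single-pass algorithm).

-- ===== PORT A =====
def apply_industry_language_py (text : String) (industry : String) : String :=
  let industry_terms : PySem.Dict String (PySem.Dict String String) :=
    PySem.Dict.mk
      [("Healthcare", PySem.Dict.mk
          [("efficiency", "patient care efficiency"),
           ("process", "clinical process"),
           ("system", "healthcare system")]),
       ("Finance", PySem.Dict.mk
          [("efficiency", "operational efficiency"),
           ("process", "transaction process"),
           ("system", "financial system")]),
       ("Technology", PySem.Dict.mk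
          [("efficiency", "development efficiency"),
           ("process", "deployment process"),
           ("system", "tech stack")])]
  -- `if industry in industry_terms: for generic, specific in industry_terms[industry].items(): text = text.replace(...)`
  match industry_terms.get? industry with
  | some terms => terms.items.foldl (fun t pr => PySem.Str.replace t pr.1 pr.2) text
  | none => text

-- ===== PORT B =====
-- inner `for generic, specific in terms.items(): if text.startswith(generic, i): ... break / else` :
-- first pair whose key starts at the current position
def pvFirstMatch (terms : List (List Char × List Char)) (cs : List Char) :
    Option (List Char × List Char) :=
  terms.find? (fun pr => pr.1.isPrefixOf cs)

-- Source B's `while i < n` loop over the text, transcribed on the remaining character list.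
-- Structural recursion on a fuel counter (= remaining length, like PySem.Chars.replace.go);
-- the fuel-exhausted and `pat.length = 0` branches are only totality guards (never reached:
-- the keys used are nonempty and the initial fuel is the text length).
def pvScanGo (terms : List (List Char × List Char)) : Nat → List Char → List Char
  | _, [] => []
  | 0, l => l
  | fuel + 1, c :: rest =>
    match pvFirstMatch terms (c :: rest) with
    | some (pat, rep) =>
      if pat.length = 0 then c :: pvScanGo terms fuel rest
      else rep ++ pvScanGo terms fuel ((c :: rest).drop pat.length)
    | none => c :: pvScanGo terms fuel rest

def pvScan (terms : List (List Char × List Char)) (cs : List Char) : List Char :=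
  pvScanGo terms cs.length cs

def apply_industry_language_py_alt (text : String) (industry : String) : String :=
  let industry_terms : PySem.Dict String (PySem.Dict String String) :=
    PySem.Dict.mk
      [("Healthcare", PySem.Dict.mk
          [("efficiency", "patient care efficiency"),
           ("process", "clinical process"),
           ("system", "healthcare system")]),
       ("Finance", PySem.Dict.mk
          [("efficiency", "operational efficiency"),
           ("process", "transaction process"),
           ("system", "financial system")]),
       ("Technology", PySem.Dict.mk
          [("efficiency", "development efficiency"),
           ("process", "deployment process"),
           ("system", "tech stack")])]
  match industry_terms.get? industry with
  | some terms =>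
    String.ofList
      (pvScan (terms.items.map (fun pr => (pr.1.toList, pr.2.toList))) text.toList)
  | none => text

-- ===== PRECONDITION & SPEC =====
-- When the industry is known and the text contains 'processystem', A's later replace('system',…)
-- cascades into the trailing 's' of the inserted process replacement (A('processystem','Finance') =
-- 'transaction procesfinancial system'), while B's single pass replaces only the leftmost term and
-- returns 'transaction processystem', the intended non-cascading substitution.
def D_apply_industry_language_py (text : String) (industry : String) : Prop :=
  (industry = "Healthcare" ∨ industry = "Finance" ∨ industry = "Technology") ∧
    PySem.Str.isIn "processystem" text = true
instance (text : String) (industry : String) : Decidable (D_apply_industry_language_py text industry) := by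
  unfold D_apply_industry_language_py; infer_instance

def Spec_apply_industry_language_py (text : String) (industry : String) (out : String) : Prop :=
  ¬ D_apply_industry_language_py text industry → out = apply_industry_language_py_alt text industry
instance (text : String) (industry : String) (out : String) : Decidable (Spec_apply_industry_language_py text industry out) := by
  unfold Spec_apply_industry_language_py; infer_instance

def pvDiffWitness_apply_industry_language_py : String × String := ("processystem", "Finance")
def pvDiffWitnessOut_apply_industry_language_py : String × String :=
  ("transaction procesfinancial system", "transaction processystem")

-- ===== CLAIM (what is proved, stated in full; the proofs are below) =====
def Claim_unchanged_apply_industry_language_py : Prop := ∀ (text : String) (industry : String), Dom_apply_industry_language_py text industry → Spec_apply_industry_language_py text industry (apply_industry_language_py text industry)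
def Claim_exact_apply_industry_language_py : Prop := ∀ (text : String) (industry : String), Dom_apply_industry_language_py text industry → D_apply_industry_language_py text industry → apply_industry_language_py text industry ≠ apply_industry_language_py_alt text industry
def Claim_changed_apply_industry_language_py : Prop := Dom_apply_industry_language_py (pvDiffWitness_apply_industry_language_py.1) (pvDiffWitness_apply_industry_language_py.2) ∧ D_apply_industry_language_py (pvDiffWitness_apply_industry_language_py.1) (pvDiffWitness_apply_industry_language_py.2) ∧ apply_industry_language_py (pvDiffWitness_apply_industry_language_py.1) (pvDiffWitness_apply_industry_language_py.2) = pvDiffWitnessOut_apply_industry_language_py.1 ∧ apply_industry_language_py_alt (pvDiffWitness_apply_industry_language_py.1) (pvDiffWitness_apply_industry_language_py.2) = pvDiffWitnessOut_apply_industry_language_py.2 ∧ pvDiffWitnessOut_apply_industry_language_py.1 ≠ pvDiffWitnessOut_apply_industry_language_py.2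

-- ===== LEMMAS AND PROOFS =====

def pvRep (old new : List Char) : List Char → List Char
  | [] => []
  | c :: rest =>
    if old.isPrefixOf (c :: rest) then
      if _h : old.length = 0 then c :: pvRep old new rest
      else new ++ pvRep old new ((c :: rest).drop old.length)
    else c :: pvRep old new rest
  termination_by cs => cs.length
  decreasing_by all_goals (simp [List.length_drop]; try omega)

theorem pvRep_go (old new : List Char) (hne : old ≠ []) :
    ∀ (fuel : Nat) (l acc : List Char), l.length ≤ fuel →
      PySem.Chars.replace.go old new fuel l acc = acc.reverse ++ pvRep old new l := by
  intro fuel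
  induction fuel with
  | zero =>
    intro l acc hl
    have : l = [] := by
      cases l with
      | nil => rfl
      | cons a t => simp at hl
    subst this
    simp [PySem.Chars.replace.go, pvRep]
  | succ fuel ih =>
    intro l acc hl
    cases l with
    | nil => simp [PySem.Chars.replace.go, pvRep]
    | cons c t =>
      by_cases hp : old.isPrefixOf (c :: t) = true
      · have hlen : 0 < old.length := List.length_pos_of_ne_nil hne
        have hdrop : ((c :: t).drop old.length).length ≤ fuel := by
          simp [List.length_drop]
          simp at hl
          omega
        rw [PySem.Chars.replace.go]
        simp only [hp, if_pos]
        rw [ih _ _ hdrop]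
        rw [pvRep]
        simp only [hp, if_pos]
        rw [dif_neg (by omega)]
        simp
      · have hlen : t.length ≤ fuel := by simp at hl; omega
        rw [PySem.Chars.replace.go]
        simp only [hp]
        rw [ih _ _ hlen]
        rw [pvRep]
        simp [hp]

theorem pvReplace_eq (s old new : List Char) (hne : old ≠ []) :
    PySem.Chars.replace s old new = pvRep old new s := by
  rw [PySem.Chars.replace]
  rw [if_neg (by simp [hne])]
  rw [pvRep_go old new hne s.length s [] le_rfl]
  simp

theorem pvPrefix_append_cases {q w v : List Char} (h : q <+: w ++ v) : q <+: w ∨ w <+: q := by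
  induction w generalizing q with
  | nil => right; exact List.nil_prefix
  | cons a w' ih =>
    cases q with
    | nil => left; exact List.nil_prefix
    | cons b q' =>
      rw [List.cons_append, List.cons_prefix_cons] at h
      obtain ⟨rfl, h'⟩ := h
      rcases ih h' with h1 | h1
      · left; exact List.cons_prefix_cons.mpr ⟨rfl, h1⟩
      · right; exact List.cons_prefix_cons.mpr ⟨rfl, h1⟩

theorem pvRep_append (old new : List Char) :
    ∀ (u v : List Char), (∀ i, i < u.length → ¬ old <+: (u.drop i ++ v)) →
      pvRep old new (u ++ v) = u ++ pvRep old new v := by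
  intro u
  induction u with
  | nil => intro v _; simp
  | cons a u' ih =>
    intro v h
    have h0 : ¬ old <+: (a :: u') ++ v := by
      have := h 0 (by simp)
      simpa using this
    have hb : old.isPrefixOf ((a :: u') ++ v) = false := by
      rw [Bool.eq_false_iff]
      intro hcon
      exact h0 (List.isPrefixOf_iff_prefix.mp hcon)
    rw [List.cons_append, pvRep]
    rw [List.cons_append] at hb
    simp only [hb]
    rw [if_neg (by simp)]
    rw [ih v (fun i hi => by simpa using h (i + 1) (by simpa using hi))]
    simp

def pvSafe (old u : List Char) : Bool :=
  (List.range u.length).all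
    (fun i => !(old.isPrefixOf (u.drop i)) && !((u.drop i).isPrefixOf old))

theorem pvRep_append_of_safe (old new u v : List Char)
    (hs : pvSafe old u = true) :
    pvRep old new (u ++ v) = u ++ pvRep old new v := by
  apply pvRep_append old new
  intro i hi hcon
  have hsi := (List.all_eq_true.mp hs) i (List.mem_range.mpr hi)
  simp only [Bool.and_eq_true, Bool.not_eq_true'] at hsi
  rcases pvPrefix_append_cases hcon with h1 | h1
  · exact absurd (List.isPrefixOf_iff_prefix.mpr h1) (by simp [hsi.1])
  · exact absurd (List.isPrefixOf_iff_prefix.mpr h1) (by simp [hsi.2])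

theorem pvRep_prefix_rev (old new : List Char) (hne : old ≠ []) :
    ∀ (t q : List Char), q.length ≤ new.length → (∀ k, k < q.length → ¬ (q.drop k <+: new)) →
      q <+: pvRep old new t → q <+: t := by
  have main : ∀ (n : Nat) (t : List Char), t.length ≤ n →
      ∀ (q : List Char), q.length ≤ new.length → (∀ k, k < q.length → ¬ (q.drop k <+: new)) →
        q <+: pvRep old new t → q <+: t := by
    intro n
    induction n with
    | zero =>
      intro t ht q _ _ hq
      have : t = [] := by cases t with | nil => rfl | cons a r => simp at ht
      subst this
      rw [pvRep] at hq
      exact hq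
    | succ n ih =>
      intro t ht
      cases t with
      | nil =>
        intro q _ _ hq
        rw [pvRep] at hq
        exact hq
      | cons c r =>
        intro q hlen hk hq
        by_cases hm : old.isPrefixOf (c :: r) = true
        · rw [pvRep] at hq
          simp only [hm, if_pos] at hq
          rw [dif_neg (by simp; omega)] at hq
          cases q with
          | nil => exact List.nil_prefix
          | cons b q' =>
            exfalso
            have hqnew : (b :: q') <+: new := by
              rcases pvPrefix_append_cases hq with h1 | h1
              · exact h1
              · have : new = b :: q' := List.IsPrefix.eq_of_length_le h1 (by simpa using hlen)
                rw [this]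
            exact hk 0 (by simp) (by simpa using hqnew)
        · rw [pvRep] at hq
          simp only [hm] at hq
          rw [if_neg (by simp)] at hq
          cases q with
          | nil => exact List.nil_prefix
          | cons b q' =>
            rw [List.cons_prefix_cons] at hq
            obtain ⟨rfl, hq'⟩ := hq
            have : q' <+: r :=
              ih r (by simp at ht; omega) q' (by simpa using Nat.le_of_succ_le hlen)
                (fun k hkk => by simpa using hk (k + 1) (by simpa using hkk)) hq'
            exact List.cons_prefix_cons.mpr ⟨rfl, this⟩
  exact fun t q h1 h2 h3 => main t.length t le_rfl q h1 h2 h3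

theorem pvRep_head_match (old new v : List Char) (hne : old ≠ []) :
    pvRep old new (old ++ v) = new ++ pvRep old new v := by
  cases old with
  | nil => exact absurd rfl hne
  | cons a o' =>
    have hcons : a :: (o' ++ v) = (a :: o') ++ v := rfl
    rw [List.cons_append, pvRep]
    rw [if_pos (List.isPrefixOf_iff_prefix.mpr (by rw [hcons]; exact List.prefix_append _ _))]
    rw [dif_neg (by simp)]
    rw [hcons, List.drop_left]

theorem pvRep_cons_no_match (old new : List Char) (c : Char) (X : List Char)
    (h : ¬ old <+: c :: X) : pvRep old new (c :: X) = c :: pvRep old new X := by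
  rw [pvRep]
  rw [if_neg (fun hc => h (List.isPrefixOf_iff_prefix.mp hc))]

theorem pvScanGo_cons_some (terms : List (List Char × List Char)) (fuel : Nat) (c : Char)
    (rest pat rep : List Char)
    (hfm : pvFirstMatch terms (c :: rest) = some (pat, rep))
    (hne : ¬ pat.length = 0) :
    pvScanGo terms (fuel + 1) (c :: rest)
      = rep ++ pvScanGo terms fuel ((c :: rest).drop pat.length) := by
  rw [pvScanGo, hfm]
  dsimp only
  rw [if_neg hne]

theorem pvScanGo_cons_none (terms : List (List Char × List Char)) (fuel : Nat) (c : Char)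
    (rest : List Char)
    (hfm : pvFirstMatch terms (c :: rest) = none) :
    pvScanGo terms (fuel + 1) (c :: rest) = c :: pvScanGo terms fuel rest := by
  rw [pvScanGo, hfm]

theorem pvMain (re rp rs : List Char)
    (h1 : pvSafe "process".toList re = true)
    (h2 : pvSafe "system".toList re = true)
    (h3 : pvSafe "efficiency".toList "process".toList = true)
    (h4 : pvSafe "efficiency".toList "system".toList = true)
    (h5 : pvSafe "process".toList "system".toList = true)
    (hb : ∀ v : List Char, ¬ ("ystem".toList <+: v) →
            ∀ i, i < rp.length → ¬ ("system".toList <+: (rp.drop i ++ v)))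
    (q1 : ("ystem".toList).length ≤ re.length)
    (q2 : ∀ k, k < ("ystem".toList).length → ¬ (("ystem".toList).drop k <+: re))
    (q3 : ("ystem".toList).length ≤ rp.length)
    (q4 : ∀ k, k < ("ystem".toList).length → ¬ (("ystem".toList).drop k <+: rp))
    (q5 : ("rocess".toList).length ≤ re.length)
    (q6 : ∀ k, k < ("rocess".toList).length → ¬ (("rocess".toList).drop k <+: re)) :
    ∀ (fuel : Nat) (cs : List Char), cs.length ≤ fuel → ¬ ("processystem".toList <:+: cs) →
      pvScanGo [("efficiency".toList, re), ("process".toList, rp), ("system".toList, rs)] fuel cs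
        = pvRep "system".toList rs (pvRep "process".toList rp (pvRep "efficiency".toList re cs)) := by
  intro fuel
  induction fuel with
  | zero =>
    intro cs hl _
    have : cs = [] := by cases cs with | nil => rfl | cons a t => simp at hl
    subst this
    simp [pvScanGo, pvRep]
  | succ fuel ih =>
    intro cs hl hinf
    cases cs with
    | nil => simp [pvScanGo, pvRep]
    | cons c t0 =>
      by_cases hE : "efficiency".toList <+: (c :: t0)
      · -- 'efficiency' matches here
        have hEb : ("efficiency".toList).isPrefixOf (c :: t0) = true :=
          List.isPrefixOf_iff_prefix.mpr hE
        obtain ⟨t, ht⟩ := hE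
        have hfm : pvFirstMatch [("efficiency".toList, re), ("process".toList, rp), ("system".toList, rs)] (c :: t0) = some ("efficiency".toList, re) := by
          simp only [pvFirstMatch, List.find?_cons, hEb]
        rw [pvScanGo_cons_some _ _ _ _ _ _ hfm (by decide)]
        rw [← ht, List.drop_left]
        rw [pvRep_head_match _ _ _ (by decide)]
        rw [pvRep_append_of_safe _ rp _ _ h1]
        rw [pvRep_append_of_safe _ rs _ _ h2]
        have hlt : t.length ≤ fuel := by
          have := congrArg List.length ht
          simp at this hl
          omega
        have hit : ¬ ("processystem".toList <:+: t) := by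
          intro hx
          exact hinf (by rw [← ht]; exact hx.trans (List.suffix_append _ _).isInfix)
        rw [ih t hlt hit]
      · by_cases hP : "process".toList <+: (c :: t0)
        · -- 'process' matches here
          have hEb : ¬ ("efficiency".toList).isPrefixOf (c :: t0) = true :=
            fun hc => hE (List.isPrefixOf_iff_prefix.mp hc)
          have hPb : ("process".toList).isPrefixOf (c :: t0) = true :=
            List.isPrefixOf_iff_prefix.mpr hP
          obtain ⟨t, ht⟩ := hP
          have hfm : pvFirstMatch [("efficiency".toList, re), ("process".toList, rp), ("system".toList, rs)] (c :: t0) = some ("process".toList, rp) := by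
            simp only [pvFirstMatch, List.find?_cons, Bool.eq_false_iff.mpr hEb, hPb]
          have hy : ¬ ("ystem".toList <+: t) := by
            intro hcon
            apply hinf
            rw [← ht]
            have : "processystem".toList = "process".toList ++ "ystem".toList := by decide
            rw [this]
            exact ((List.prefix_append_right_inj _).mpr hcon).isInfix
          rw [pvScanGo_cons_some _ _ _ _ _ _ hfm (by decide)]
          rw [← ht, List.drop_left]
          rw [pvRep_append_of_safe _ re _ _ h3]
          rw [pvRep_head_match _ _ _ (by decide)]
          have hYy : ¬ ("ystem".toList <+: pvRep "process".toList rp (pvRep "efficiency".toList re t)) := by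
            intro hcon
            exact hy (pvRep_prefix_rev _ _ (by decide) _ _ q1 q2
              (pvRep_prefix_rev _ _ (by decide) _ _ q3 q4 hcon))
          rw [pvRep_append _ rs rp _ (fun i hi => hb _ hYy i hi)]
          have hlt : t.length ≤ fuel := by
            have := congrArg List.length ht
            simp at this hl
            omega
          have hit : ¬ ("processystem".toList <:+: t) := by
            intro hx
            exact hinf (by rw [← ht]; exact hx.trans (List.suffix_append _ _).isInfix)
          rw [ih t hlt hit]
        · by_cases hS : "system".toList <+: (c :: t0)
          · -- 'system' matches here
            have hEb : ¬ ("efficiency".toList).isPrefixOf (c :: t0) = true :=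
              fun hc => hE (List.isPrefixOf_iff_prefix.mp hc)
            have hPb : ¬ ("process".toList).isPrefixOf (c :: t0) = true :=
              fun hc => hP (List.isPrefixOf_iff_prefix.mp hc)
            have hSb : ("system".toList).isPrefixOf (c :: t0) = true :=
              List.isPrefixOf_iff_prefix.mpr hS
            obtain ⟨t, ht⟩ := hS
            have hfm : pvFirstMatch [("efficiency".toList, re), ("process".toList, rp), ("system".toList, rs)] (c :: t0) = some ("system".toList, rs) := by
              simp only [pvFirstMatch, List.find?_cons, Bool.eq_false_iff.mpr hEb, Bool.eq_false_iff.mpr hPb, hSb]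
            rw [pvScanGo_cons_some _ _ _ _ _ _ hfm (by decide)]
            rw [← ht, List.drop_left]
            rw [pvRep_append_of_safe _ re _ _ h4]
            rw [pvRep_append_of_safe _ rp _ _ h5]
            rw [pvRep_head_match _ _ _ (by decide)]
            have hlt : t.length ≤ fuel := by
              have := congrArg List.length ht
              simp at this hl
              omega
            have hit : ¬ ("processystem".toList <:+: t) := by
              intro hx
              exact hinf (by rw [← ht]; exact hx.trans (List.suffix_append _ _).isInfix)
            rw [ih t hlt hit]
          · -- no term matches here: copy one character
            have hEb : ¬ ("efficiency".toList).isPrefixOf (c :: t0) = true :=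
              fun hc => hE (List.isPrefixOf_iff_prefix.mp hc)
            have hPb : ¬ ("process".toList).isPrefixOf (c :: t0) = true :=
              fun hc => hP (List.isPrefixOf_iff_prefix.mp hc)
            have hSb : ¬ ("system".toList).isPrefixOf (c :: t0) = true :=
              fun hc => hS (List.isPrefixOf_iff_prefix.mp hc)
            have hfm : pvFirstMatch [("efficiency".toList, re), ("process".toList, rp), ("system".toList, rs)] (c :: t0) = none := by
              simp only [pvFirstMatch, List.find?_cons, Bool.eq_false_iff.mpr hEb, Bool.eq_false_iff.mpr hPb,
                Bool.eq_false_iff.mpr hSb, List.find?_nil]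
            rw [pvScanGo_cons_none _ _ _ _ hfm]
            rw [pvRep_cons_no_match _ _ _ _ hE]
            have hP2 : ¬ ("process".toList <+: c :: pvRep "efficiency".toList re t0) := by
              intro hcon
              rw [show ("process".toList) = 'p' :: "rocess".toList from by decide,
                  List.cons_prefix_cons] at hcon
              obtain ⟨hc, hrest⟩ := hcon
              have := pvRep_prefix_rev _ _ (by decide) _ _ q5 q6 hrest
              exact hP (by
                rw [show ("process".toList) = 'p' :: "rocess".toList from by decide,
                    List.cons_prefix_cons]
                exact ⟨hc, this⟩)
            rw [pvRep_cons_no_match _ _ _ _ hP2]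
            have hS2 : ¬ ("system".toList <+: c :: pvRep "process".toList rp (pvRep "efficiency".toList re t0)) := by
              intro hcon
              rw [show ("system".toList) = 's' :: "ystem".toList from by decide,
                  List.cons_prefix_cons] at hcon
              obtain ⟨hc, hrest⟩ := hcon
              have := pvRep_prefix_rev _ _ (by decide) _ _ q1 q2
                (pvRep_prefix_rev _ _ (by decide) _ _ q3 q4 hrest)
              exact hS (by
                rw [show ("system".toList) = 's' :: "ystem".toList from by decide,
                    List.cons_prefix_cons]
                exact ⟨hc, this⟩)
            rw [pvRep_cons_no_match _ _ _ _ hS2]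
            have hlt : t0.length ≤ fuel := by simp at hl; omega
            have hit : ¬ ("processystem".toList <:+: t0) := by
              intro hx
              exact hinf (hx.trans (List.suffix_cons c t0).isInfix)
            rw [ih t0 hlt hit]

-- per-industry boundary fact: inside the 'process' replacement the only way 'system' can start
-- is at the final 's', which needs 'ystem' to follow
theorem pvHb (rp : List Char)
    (hA : ∀ i, i < rp.length → ¬ ("system".toList <+: rp.drop i))
    (hB : ∀ i, i < rp.length → (rp.drop i <+: "system".toList) → rp.drop i = ['s']) :
    ∀ v : List Char, ¬ ("ystem".toList <+: v) →
      ∀ i, i < rp.length → ¬ ("system".toList <+: (rp.drop i ++ v)) := by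
  intro v hv i hi hcon
  rcases pvPrefix_append_cases hcon with h | h
  · exact hA i hi h
  · rw [hB i hi h] at hcon
    rw [show ("system".toList) = 's' :: "ystem".toList from by decide,
        List.singleton_append, List.cons_prefix_cons] at hcon
    exact hv hcon.2

-- A's three-pass result, written as nested pvRep
theorem pvStr3 (s o1 n1 o2 n2 o3 n3 : String)
    (h1 : o1.toList ≠ []) (h2 : o2.toList ≠ []) (h3 : o3.toList ≠ []) :
    PySem.Str.replace (PySem.Str.replace (PySem.Str.replace s o1 n1) o2 n2) o3 n3
      = String.ofList (pvRep o3.toList n3.toList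
          (pvRep o2.toList n2.toList (pvRep o1.toList n1.toList s.toList))) := by
  rw [PySem.Str.replace, PySem.Str.replace, PySem.Str.replace]
  rw [String.toList_ofList, String.toList_ofList]
  rw [pvReplace_eq _ _ _ h1, pvReplace_eq _ _ _ h2, pvReplace_eq _ _ _ h3]

-- one industry, fully assembled on the string level
theorem pvIndustry (text : String) (e p sy re rp rs : String)
    (hA : ∀ i, i < rp.toList.length → ¬ ("system".toList <+: rp.toList.drop i))
    (hB : ∀ i, i < rp.toList.length → (rp.toList.drop i <+: "system".toList) → rp.toList.drop i = ['s'])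
    (he : e = "efficiency") (hp : p = "process") (hsy : sy = "system")
    (hq1 : pvSafe "process".toList re.toList = true)
    (hq2 : pvSafe "system".toList re.toList = true)
    (hq3 : ("ystem".toList).length ≤ re.toList.length)
    (hq4 : ∀ k, k < ("ystem".toList).length → ¬ (("ystem".toList).drop k <+: re.toList))
    (hq5 : ("ystem".toList).length ≤ rp.toList.length)
    (hq6 : ∀ k, k < ("ystem".toList).length → ¬ (("ystem".toList).drop k <+: rp.toList))
    (hq7 : ("rocess".toList).length ≤ re.toList.length)
    (hq8 : ∀ k, k < ("rocess".toList).length → ¬ (("rocess".toList).drop k <+: re.toList))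
    (hni : ¬ ("processystem".toList <:+: text.toList)) :
    PySem.Str.replace (PySem.Str.replace (PySem.Str.replace text e re) p rp) sy rs
      = String.ofList (pvScan [(e.toList, re.toList), (p.toList, rp.toList), (sy.toList, rs.toList)]
          text.toList) := by
  subst he hp hsy
  rw [pvStr3 _ _ _ _ _ _ _ (by decide) (by decide) (by decide)]
  rw [pvScan]
  rw [pvMain re.toList rp.toList rs.toList hq1 hq2 (by decide) (by decide)
      (by decide) (pvHb rp.toList hA hB) hq3 hq4 hq5 hq6 hq7 hq8
      text.toList.length text.toList le_rfl hni]

-- ===== VERDICT (by name: the statement is the Claim_ definition above) =====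
theorem apply_industry_language_py_spec : Claim_unchanged_apply_industry_language_py := by
  intro text industry _hdom hnd
  have hni : (industry = "Healthcare" ∨ industry = "Finance" ∨ industry = "Technology") →
      ¬ ("processystem".toList <:+: text.toList) := by
    intro hmem hx
    apply hnd
    refine ⟨hmem, ?_⟩
    have : PySem.Chars.isIn ("processystem".toList) text.toList = true :=
      (PySem.Chars.isIn_iff_infix _ _).mpr hx
    simpa using this
  by_cases hH : industry = "Healthcare"
  · subst hH
    show apply_industry_language_py text "Healthcare" = apply_industry_language_py_alt text "Healthcare"
    have hA : apply_industry_language_py text "Healthcare"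
        = PySem.Str.replace (PySem.Str.replace (PySem.Str.replace text "efficiency"
            "patient care efficiency") "process" "clinical process") "system" "healthcare system" := rfl
    have hB : apply_industry_language_py_alt text "Healthcare"
        = String.ofList (pvScan [("efficiency".toList, "patient care efficiency".toList),
            ("process".toList, "clinical process".toList),
            ("system".toList, "healthcare system".toList)] text.toList) := rfl
    rw [hA, hB]
    exact pvIndustry text _ _ _ _ _ _ (by decide) (by decide) rfl rfl rfl (by decide) (by decide)
      (by decide) (by decide) (by decide) (by decide) (by decide) (by decide) (hni (Or.inl rfl))
  · by_cases hF : industry = "Finance"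
    · subst hF
      show apply_industry_language_py text "Finance" = apply_industry_language_py_alt text "Finance"
      have hA : apply_industry_language_py text "Finance"
          = PySem.Str.replace (PySem.Str.replace (PySem.Str.replace text "efficiency"
              "operational efficiency") "process" "transaction process") "system" "financial system" := rfl
      have hB : apply_industry_language_py_alt text "Finance"
          = String.ofList (pvScan [("efficiency".toList, "operational efficiency".toList),
              ("process".toList, "transaction process".toList),
              ("system".toList, "financial system".toList)] text.toList) := rfl
      rw [hA, hB]
      exact pvIndustry text _ _ _ _ _ _ (by decide) (by decide) rfl rfl rfl (by decide) (by decide)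
        (by decide) (by decide) (by decide) (by decide) (by decide) (by decide)
        (hni (Or.inr (Or.inl rfl)))
    · by_cases hT : industry = "Technology"
      · subst hT
        show apply_industry_language_py text "Technology" = apply_industry_language_py_alt text "Technology"
        have hA : apply_industry_language_py text "Technology"
            = PySem.Str.replace (PySem.Str.replace (PySem.Str.replace text "efficiency"
                "development efficiency") "process" "deployment process") "system" "tech stack" := rfl
        have hB : apply_industry_language_py_alt text "Technology"
            = String.ofList (pvScan [("efficiency".toList, "development efficiency".toList),
                ("process".toList, "deployment process".toList),
                ("system".toList, "tech stack".toList)] text.toList) := rfl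
        rw [hA, hB]
        exact pvIndustry text _ _ _ _ _ _ (by decide) (by decide) rfl rfl rfl (by decide) (by decide)
          (by decide) (by decide) (by decide) (by decide) (by decide) (by decide)
          (hni (Or.inr (Or.inr rfl)))
      · -- unknown industry: both return the text unchanged
        have hg : (PySem.Dict.mk (("Healthcare", PySem.Dict.mk
                [("efficiency", "patient care efficiency"),
                 ("process", "clinical process"),
                 ("system", "healthcare system")]) ::
              ("Finance", PySem.Dict.mk
                [("efficiency", "operational efficiency"),
                 ("process", "transaction process"),
                 ("system", "financial system")]) ::
              ("Technology", PySem.Dict.mk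
                [("efficiency", "development efficiency"),
                 ("process", "deployment process"),
                 ("system", "tech stack")]) :: [])).get? industry = none := by
          rw [PySem.Dict.get?_mk_cons, PySem.Dict.get?_mk_cons, PySem.Dict.get?_mk_cons]
          rw [if_neg (fun hc => hH (beq_iff_eq.mp hc).symm),
              if_neg (fun hc => hF (beq_iff_eq.mp hc).symm),
              if_neg (fun hc => hT (beq_iff_eq.mp hc).symm)]
          rfl
        show apply_industry_language_py text industry = apply_industry_language_py_alt text industry
        simp only [apply_industry_language_py, apply_industry_language_py_alt]
        rw [hg]

theorem apply_industry_language_py_changed : Claim_changed_apply_industry_language_py := by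
  unfold Claim_changed_apply_industry_language_py; decide

-- ===== TIGHTNESS MACHINERY =====

-- infix as "prefix of some drop"
theorem pvInfixDrop (q l : List Char) : (∃ j, q <+: l.drop j) ↔ q <:+: l :=
  (PySem.Chars.exists_prefix_drop_iff_isIn q l).trans (PySem.Chars.isIn_iff_infix q l)

theorem pvFirstMatch_none (terms : List (List Char × List Char)) (cs : List Char)
    (h : ∀ pr ∈ terms, ¬ (pr.1 <+: cs)) : pvFirstMatch terms cs = none := by
  unfold pvFirstMatch
  rw [List.find?_eq_none]
  intro pr hpr
  simp only [Bool.not_eq_true]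
  rw [Bool.eq_false_iff]
  exact fun hc => h pr hpr (List.isPrefixOf_iff_prefix.mp hc)

-- the scan copies a block no term can start in
theorem pvScanGo_copy_append (terms : List (List Char × List Char)) :
    ∀ (u v : List Char) (fuel : Nat),
      (∀ i, i < u.length → ∀ pr ∈ terms, ¬ (pr.1 <+: (u.drop i ++ v))) →
      u.length + v.length ≤ fuel →
      pvScanGo terms fuel (u ++ v) = u ++ pvScanGo terms (fuel - u.length) v := by
  intro u
  induction u with
  | nil => intro v fuel _ _; simp
  | cons a u' ih =>
    intro v fuel h hf
    cases fuel with
    | zero => simp at hf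
    | succ f =>
      rw [List.cons_append,
        pvScanGo_cons_none _ _ _ _ (pvFirstMatch_none _ _ (fun pr hpr => by
          have := h 0 (by simp) pr hpr
          simpa using this))]
      rw [ih v f (fun i hi pr hpr => by
            have := h (i + 1) (by simpa using hi) pr hpr
            simpa using this)
          (by simp at hf ⊢; omega)]
      simp

-- one step of tracking a would-be 'processystem' prefix through A's 'system' pass
theorem pvResCons (rs : List Char) (c : Char) (r : List Char)
    (h1 : ¬ ((c :: r) <+: rs)) (h2 : ¬ (rs <+: (c :: r))) :
    ∀ Z, (c :: r) <+: pvRep "system".toList rs Z →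
      ∃ Z', Z = c :: Z' ∧ ¬ ("system".toList <+: Z) ∧ r <+: pvRep "system".toList rs Z' := by
  intro Z h
  cases Z with
  | nil =>
    rw [pvRep] at h
    exact absurd (List.prefix_nil.mp h) (by simp)
  | cons c0 rest =>
    by_cases hm : "system".toList <+: (c0 :: rest)
    · obtain ⟨w, hw⟩ := hm
      rw [← hw, pvRep_head_match _ _ _ (by decide)] at h
      rcases pvPrefix_append_cases h with hx | hx
      · exact absurd hx h1
      · exact absurd hx h2
    · rw [pvRep_cons_no_match _ _ _ _ hm, List.cons_prefix_cons] at h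
      obtain ⟨rfl, hr⟩ := h
      exact ⟨rest, rfl, hm, hr⟩

-- A's final pass never leaves 'processystem' as a prefix of its output
theorem pvPrefD (rs : List Char)
    (hres : ∀ i, i < 7 → ¬ (("processystem".toList).drop i <+: rs) ∧
                          ¬ (rs <+: ("processystem".toList).drop i))
    (hq1 : ("system".toList).length ≤ rs.length)
    (hq2 : ∀ k, k < ("system".toList).length → ¬ (("system".toList).drop k <+: rs)) :
    ∀ Z, ¬ ("processystem".toList <+: pvRep "system".toList rs Z) := by
  intro Z h
  rw [show ("processystem".toList)
      = 'p' :: 'r' :: 'o' :: 'c' :: 'e' :: 's' :: ("system".toList) from by decide] at h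
  obtain ⟨Z1, _, _, h⟩ := pvResCons rs 'p' _
    (by simpa using (hres 0 (by omega)).1) (by simpa using (hres 0 (by omega)).2) _ h
  obtain ⟨Z2, _, _, h⟩ := pvResCons rs 'r' _
    (by simpa using (hres 1 (by omega)).1) (by simpa using (hres 1 (by omega)).2) _ h
  obtain ⟨Z3, _, _, h⟩ := pvResCons rs 'o' _
    (by simpa using (hres 2 (by omega)).1) (by simpa using (hres 2 (by omega)).2) _ h
  obtain ⟨Z4, _, _, h⟩ := pvResCons rs 'c' _
    (by simpa using (hres 3 (by omega)).1) (by simpa using (hres 3 (by omega)).2) _ h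
  obtain ⟨Z5, _, _, h⟩ := pvResCons rs 'e' _
    (by simpa using (hres 4 (by omega)).1) (by simpa using (hres 4 (by omega)).2) _ h
  obtain ⟨Z6, _, _, h⟩ := pvResCons rs 's' _
    (by simpa using (hres 5 (by omega)).1) (by simpa using (hres 5 (by omega)).2) _ h
  have hs : "system".toList <+: Z6 :=
    pvRep_prefix_rev _ _ (by decide) Z6 _ hq1 hq2 h
  obtain ⟨w, hw⟩ := hs
  rw [← hw, pvRep_head_match _ _ _ (by decide)] at h
  rcases pvPrefix_append_cases h with hx | hx
  · exact (hres 6 (by omega)).1 (by simpa using hx)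
  · exact (hres 6 (by omega)).2 (by simpa using hx)

-- …nor anywhere inside its output
theorem pvNoInfixA (rs : List Char)
    (hres : ∀ i, i < 7 → ¬ (("processystem".toList).drop i <+: rs) ∧
                          ¬ (rs <+: ("processystem".toList).drop i))
    (hq1 : ("system".toList).length ≤ rs.length)
    (hq2 : ∀ k, k < ("system".toList).length → ¬ (("system".toList).drop k <+: rs))
    (hp : ∀ m, m < rs.length → ¬ ("processystem".toList <+: rs.drop m) ∧
                                ¬ (rs.drop m <+: "processystem".toList)) :
    ∀ (fuel : Nat) (Z : List Char), Z.length ≤ fuel →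
      ¬ ("processystem".toList <:+: pvRep "system".toList rs Z) := by
  intro fuel
  induction fuel with
  | zero =>
    intro Z hl h
    have : Z = [] := by cases Z with | nil => rfl | cons a t => simp at hl
    subst this
    rw [pvRep] at h
    exact absurd (List.infix_nil.mp h) (by decide)
  | succ fuel ih =>
    intro Z hl h
    cases Z with
    | nil =>
      rw [pvRep] at h
      exact absurd (List.infix_nil.mp h) (by decide)
    | cons c rest =>
      by_cases hm : "system".toList <+: (c :: rest)
      · obtain ⟨t, htw⟩ := hm
        rw [← htw, pvRep_head_match _ _ _ (by decide)] at h
        obtain ⟨j, hj⟩ := (pvInfixDrop _ _).mpr h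
        by_cases hjl : j ≤ rs.length
        · rw [List.drop_append_of_le_length hjl] at hj
          by_cases hje : j < rs.length
          · rcases pvPrefix_append_cases hj with hx | hx
            · exact (hp j hje).1 hx
            · exact (hp j hje).2 hx
          · have hje' : j = rs.length := by omega
            subst hje'
            rw [List.drop_length, List.nil_append] at hj
            have hlt : t.length ≤ fuel := by
              have := congrArg List.length htw
              simp at this hl
              omega
            exact ih t hlt ((pvInfixDrop _ _).mp ⟨0, by simpa using hj⟩)
        · obtain ⟨k, hk⟩ : ∃ k, j = rs.length + k := ⟨j - rs.length, by omega⟩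
          subst hk
          rw [List.drop_length_add_append] at hj
          have hlt : t.length ≤ fuel := by
            have := congrArg List.length htw
            simp at this hl
            omega
          exact ih t hlt ((pvInfixDrop _ _).mp ⟨k, hj⟩)
      · rw [pvRep_cons_no_match _ _ _ _ hm] at h
        rcases List.infix_cons_iff.mp h with hx | hx
        · rw [← pvRep_cons_no_match _ _ _ _ hm] at hx
          exact pvPrefD rs hres hq1 hq2 _ hx
        · exact ih rest (by simp at hl; omega) hx

-- B's scan keeps 'processystem' whenever the input contains it
theorem pvBInf (re rp rs : List Char)
    (hrp : ∃ rp', rp = rp' ++ "process".toList) :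
    ∀ (fuel : Nat) (cs : List Char), cs.length ≤ fuel →
      "processystem".toList <:+: cs →
      "processystem".toList <:+:
        pvScanGo [("efficiency".toList, re), ("process".toList, rp), ("system".toList, rs)]
          fuel cs := by
  intro fuel
  induction fuel with
  | zero =>
    intro cs hl h
    have : cs = [] := by cases cs with | nil => rfl | cons a t => simp at hl
    subst this
    exact absurd (List.infix_nil.mp h) (by decide)
  | succ fuel ih =>
    intro cs hl h
    cases cs with
    | nil => exact absurd (List.infix_nil.mp h) (by decide)
    | cons c t0 =>
      by_cases hd0 : "processystem".toList <+: (c :: t0)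
      · -- the occurrence is right here: 'process' is replaced, 'ystem' is copied
        obtain ⟨w, hw⟩ := hd0
        rw [show ("processystem".toList) = "process".toList ++ "ystem".toList from by decide,
            List.append_assoc] at hw
        have hP : "process".toList <+: (c :: t0) := ⟨_, hw⟩
        have hEn : ¬ ("efficiency".toList <+: (c :: t0)) := by
          intro he
          rcases List.prefix_or_prefix_of_prefix he hP with hx | hx <;> revert hx <;> decide
        have hEb : ¬ ("efficiency".toList).isPrefixOf (c :: t0) = true :=
          fun hc => hEn (List.isPrefixOf_iff_prefix.mp hc)
        have hPb : ("process".toList).isPrefixOf (c :: t0) = true :=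
          List.isPrefixOf_iff_prefix.mpr hP
        have hfm : pvFirstMatch [("efficiency".toList, re), ("process".toList, rp),
            ("system".toList, rs)] (c :: t0) = some ("process".toList, rp) := by
          simp only [pvFirstMatch, List.find?_cons, Bool.eq_false_iff.mpr hEb, hPb]
        rw [pvScanGo_cons_some _ _ _ _ _ _ hfm (by decide)]
        rw [← hw, List.drop_left]
        rw [pvScanGo_copy_append _ ("ystem".toList) w fuel
            (by
              intro i hi pr hpr hcon
              have hi5 : i < 5 := by simpa using hi
              simp only [List.mem_cons, List.not_mem_nil, or_false] at hpr
              have hp1 : pr.1 = "efficiency".toList ∨ pr.1 = "process".toList ∨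
                  pr.1 = "system".toList := by
                rcases hpr with h' | h' | h' <;> subst h' <;> simp
              rcases pvPrefix_append_cases hcon with hx | hx <;>
                rcases hp1 with h1 | h1 | h1 <;> rw [h1] at hx <;>
                  (interval_cases i <;> revert hx <;> decide))
            (by
              have hlw := congrArg List.length hw
              simp at hlw hl
              rw [show ("ystem".toList).length = 5 from by decide]
              omega)]
        obtain ⟨rp', rfl⟩ := hrp
        have hassoc : (rp' ++ "process".toList) ++ ("ystem".toList ++
              pvScanGo [("efficiency".toList, re),
                ("process".toList, rp' ++ "process".toList), ("system".toList, rs)]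
                (fuel - ("ystem".toList).length) w)
            = rp' ++ ("processystem".toList ++
              pvScanGo [("efficiency".toList, re),
                ("process".toList, rp' ++ "process".toList), ("system".toList, rs)]
                (fuel - ("ystem".toList).length) w) := by
          rw [show ("processystem".toList) = "process".toList ++ "ystem".toList from by decide]
          simp [List.append_assoc]
        rw [hassoc]
        exact (List.prefix_append _ _).isInfix.trans (List.suffix_append _ _).isInfix
      · -- the occurrence lies strictly further right; this step cannot touch it
        obtain ⟨j, hj⟩ := (pvInfixDrop _ _).mpr h
        have hj1 : 1 ≤ j := by
          by_contra hc
          have : j = 0 := by omega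
          subst this
          exact hd0 (by simpa using hj)
        cases hfm : pvFirstMatch [("efficiency".toList, re), ("process".toList, rp),
            ("system".toList, rs)] (c :: t0) with
        | none =>
          rw [pvScanGo_cons_none _ _ _ _ hfm]
          have ht : "processystem".toList <:+: t0 := by
            refine (pvInfixDrop _ _).mp ⟨j - 1, ?_⟩
            have : (c :: t0).drop j = t0.drop (j - 1) := by
              cases j with
              | zero => omega
              | succ n => simp
            rwa [this] at hj
          exact ((ih t0 (by simp at hl; omega) ht).trans (List.suffix_cons _ _).isInfix)
        | some pr =>
          obtain ⟨pat, rep⟩ := pr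
          have hfm' := hfm
          unfold pvFirstMatch at hfm'
          have hmem := List.mem_of_find?_eq_some hfm'
          have hpc : pat <+: (c :: t0) :=
            List.isPrefixOf_iff_prefix.mp (by simpa using List.find?_some hfm')
          simp only [List.mem_cons, List.not_mem_nil, or_false] at hmem
          have hps : pat = "efficiency".toList ∨ pat = "process".toList ∨
              pat = "system".toList := by
            rcases hmem with h' | h' | h'
            exacts [Or.inl (congrArg Prod.fst h'), Or.inr (Or.inl (congrArg Prod.fst h')),
              Or.inr (Or.inr (congrArg Prod.fst h'))]
          have hd : ∀ jj, jj < pat.length → 1 ≤ jj →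
              ¬ (pat.drop jj <+: "processystem".toList) ∧
              ¬ ("processystem".toList <+: pat.drop jj) := by
            rcases hps with rfl | rfl | rfl <;> decide
          have hne0 : ¬ pat.length = 0 := by rcases hps with rfl | rfl | rfl <;> decide
          have hjp : pat.length ≤ j := by
            by_contra hc
            have hc' : j < pat.length := by omega
            have hdp : pat.drop j <+: (c :: t0).drop j := by
              obtain ⟨z, hz⟩ := hpc
              rw [← hz, List.drop_append_of_le_length (by omega)]
              exact List.prefix_append _ _
            rcases List.prefix_or_prefix_of_prefix hdp hj with hx | hx
            · exact (hd j hc' hj1).1 hx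
            · exact (hd j hc' hj1).2 hx
          rw [pvScanGo_cons_some _ _ _ _ _ _ hfm hne0]
          have ht : "processystem".toList <:+: (c :: t0).drop pat.length := by
            refine (pvInfixDrop _ _).mp ⟨j - pat.length, ?_⟩
            rw [List.drop_drop, Nat.add_sub_cancel' hjp]
            exact hj
          have hlen : ((c :: t0).drop pat.length).length ≤ fuel := by
            have h1' : 1 ≤ pat.length := by omega
            simp at hl ⊢
            omega
          exact ((ih _ hlen ht).trans (List.suffix_append _ _).isInfix)

theorem apply_industry_language_py_tight : Claim_exact_apply_industry_language_py := by
  intro text industry _hdom hD heq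
  obtain ⟨hmem, hin⟩ := hD
  have hinf : "processystem".toList <:+: text.toList :=
    (PySem.Chars.isIn_iff_infix _ _).mp (by simpa using hin)
  have key : ∀ (e p sy re rp rs : String),
      e = "efficiency" → p = "process" → sy = "system" →
      (∃ rp', rp.toList = rp' ++ "process".toList) →
      (∀ i, i < 7 → ¬ (("processystem".toList).drop i <+: rs.toList) ∧
                     ¬ (rs.toList <+: ("processystem".toList).drop i)) →
      (("system".toList).length ≤ rs.toList.length) →
      (∀ k, k < ("system".toList).length → ¬ (("system".toList).drop k <+: rs.toList)) →
      (∀ m, m < rs.toList.length → ¬ ("processystem".toList <+: rs.toList.drop m) ∧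
                                    ¬ (rs.toList.drop m <+: "processystem".toList)) →
      PySem.Str.replace (PySem.Str.replace (PySem.Str.replace text e re) p rp) sy rs
        ≠ String.ofList (pvScan [(e.toList, re.toList), (p.toList, rp.toList),
            (sy.toList, rs.toList)] text.toList) := by
    intro e p sy re rp rs he hp hsy hrp hres hq1 hq2 hpm hcontra
    subst he hp hsy
    rw [pvStr3 _ _ _ _ _ _ _ (by decide) (by decide) (by decide)] at hcontra
    have hlists := congrArg String.toList hcontra
    rw [String.toList_ofList, String.toList_ofList] at hlists
    have hBinf : "processystem".toList <:+:
        pvScan [("efficiency".toList, re.toList), ("process".toList, rp.toList),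
          ("system".toList, rs.toList)] text.toList := by
      rw [pvScan]
      exact pvBInf _ _ _ hrp text.toList.length text.toList le_rfl hinf
    refine pvNoInfixA rs.toList hres hq1 hq2 hpm
      (pvRep "process".toList rp.toList
        (pvRep "efficiency".toList re.toList text.toList)).length
      (pvRep "process".toList rp.toList
        (pvRep "efficiency".toList re.toList text.toList)) le_rfl ?_
    rw [show ("system".toList : List Char) = ['s', 'y', 's', 't', 'e', 'm'] from by decide,
        hlists]
    simpa using hBinf
  rcases hmem with rfl | rfl | rfl
  · exact key "efficiency" "process" "system" "patient care efficiency" "clinical process"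
      "healthcare system" rfl rfl rfl ⟨"clinical ".toList, by decide⟩ (by decide) (by decide)
      (by decide) (by decide) heq
  · exact key "efficiency" "process" "system" "operational efficiency" "transaction process"
      "financial system" rfl rfl rfl ⟨"transaction ".toList, by decide⟩ (by decide) (by decide)
      (by decide) (by decide) heq
  · exact key "efficiency" "process" "system" "development efficiency" "deployment process"
      "tech stack" rfl rfl rfl ⟨"deployment ".toList, by decide⟩ (by decide) (by decide)
      (by decide) (by decide) heq
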